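-- pv_equiv track=rewrite | github.com/Leooo-Shen/bedside-evo-agent | utils/static_memory_extractor.py | _extract_meta_fields
-- ===== SOURCE A (Python) =====
-- from typing import Any, Dict, List, Optional, Tuple
--
-- META_FIELD_MAPPING = {
--     "META_RACE": "race",
--     "META_LANGUAGE": "language",
--     "META_INSURANCE": "insurance",
--     "META_MARTIAL_STATUS": "marital_status",
-- }
--
-- def _safe_text(value: Any) -> str:
--     if value is None:
--         return ""
--     text = str(value).strip()
--     return text
--
-- def _extract_meta_fields(pre_or_admission_events: List[Dict[str, Any]]) -> Dict[str, Optional[str]]: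
--     values: Dict[str, Optional[str]] = {
--         "race": None,
--         "language": None,
--         "insurance": None,
--         "marital_status": None,
--     }
--
--     for event in pre_or_admission_events:
--         code = _safe_text(event.get("code"))
--         mapped_key = META_FIELD_MAPPING.get(code)
--         if not mapped_key:
--             continue
--
--         candidate = _safe_text(event.get("code_specifics")) or _safe_text(event.get("text_value"))
--         if candidate:
--             values[mapped_key] = candidate
--
--     return values
-- ===== SOURCE B (Python) =====
-- from typing import Any, Dict, List, Optional
--
-- META_FIELD_MAPPING = {
--     "META_RACE": "race",
--     "META_LANGUAGE": "language",
--     "META_INSURANCE": "insurance",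
--     "META_MARTIAL_STATUS": "marital_status",
-- }
--
-- def _safe_text(value: Any) -> str:
--     if value is None:
--         return ""
--     return str(value).strip()
--
-- def _extract_meta_fields(pre_or_admission_events: List[Dict[str, Any]]) -> Dict[str, Optional[str]]:
--     values: Dict[str, Optional[str]] = {
--         "race": None,
--         "language": None,
--         "insurance": None,
--         "marital_status": None,
--     }
--     # Scan from the end: the first truthy candidate seen in reverse is the
--     # last-truthy-wins value; stop early once all four fields are filled.
--     for event in reversed(pre_or_admission_events):
--         if all(v is not None for v in values.values()):
--             break
--         mapped_key = META_FIELD_MAPPING.get(_safe_text(event.get("code")))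
--         if mapped_key is None or values[mapped_key] is not None:
--             continue
--         candidate = _safe_text(event.get("code_specifics")) or _safe_text(event.get("text_value"))
--         if candidate:
--             values[mapped_key] = candidate
--     return values
-- ===== Notes on version B (the rewrite author's own statement) =====
-- stated objective: alternative
-- what changed: B scans the events in reverse, fills each field at most once with the first truthy candidate it meets (= A's last-truthy-wins), and breaks out as soon as all four fields are filled, instead of A's forward pass that overwrites fields repeatedly.
import Mathlib
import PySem

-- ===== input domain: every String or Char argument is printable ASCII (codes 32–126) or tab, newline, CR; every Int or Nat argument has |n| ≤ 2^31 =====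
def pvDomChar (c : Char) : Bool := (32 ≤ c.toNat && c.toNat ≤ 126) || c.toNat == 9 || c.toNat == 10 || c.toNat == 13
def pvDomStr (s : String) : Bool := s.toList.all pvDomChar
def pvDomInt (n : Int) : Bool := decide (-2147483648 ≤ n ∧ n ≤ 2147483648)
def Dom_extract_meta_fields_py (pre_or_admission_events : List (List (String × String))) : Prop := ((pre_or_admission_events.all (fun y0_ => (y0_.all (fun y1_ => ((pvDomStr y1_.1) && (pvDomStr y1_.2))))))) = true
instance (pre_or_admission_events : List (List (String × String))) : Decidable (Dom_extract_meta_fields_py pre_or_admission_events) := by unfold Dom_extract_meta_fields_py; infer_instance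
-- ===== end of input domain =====

-- B replaces A's forward overwrite pass by a reverse scan that fills each field once
-- (first truthy candidate from the end = last-truthy-wins) and stops early when all
-- four fields are filled; same return value (alternative decomposition, not faster).

-- ===== PORT A =====
-- shared module-level helpers (_safe_text and META_FIELD_MAPPING appear identically in Source A and Source B)
def pvSafeText (v : Option String) : String :=
  match v with
  | none => ""
  | some s => PySem.Str.strip s

def pvMetaFieldMapping : PySem.Dict String String :=
  PySem.Dict.ofList [("META_RACE", "race"), ("META_LANGUAGE", "language"),
    ("META_INSURANCE", "insurance"), ("META_MARTIAL_STATUS", "marital_status")]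

def extract_meta_fields_py (pre_or_admission_events : List (List (String × String))) : List (String × Option String) :=
  let values : PySem.Dict String (Option String) :=
    PySem.Dict.ofList [("race", none), ("language", none), ("insurance", none), ("marital_status", none)]
  let values := pre_or_admission_events.foldl (fun vals event =>
    let d := PySem.Dict.ofList event
    let code := pvSafeText (d.get? "code")
    match pvMetaFieldMapping.get? code with
    | none => vals
    | some mapped_key =>
      let candidate :=
        let a := pvSafeText (d.get? "code_specifics")
        if a ≠ "" then a else pvSafeText (d.get? "text_value")
      if candidate ≠ "" then vals.insert mapped_key (some candidate) else vals) values
  values.items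

-- ===== PORT B =====
-- loop of Source B: reverse scan, break when all four filled, never overwrite a filled field
def pvGoB : List (List (String × String)) → Option String → Option String → Option String → Option String →
    Option String × Option String × Option String × Option String
  | [], r, l, i, m => (r, l, i, m)
  | event :: rest, r, l, i, m =>
    if r.isSome && l.isSome && i.isSome && m.isSome then (r, l, i, m)
    else
      let d := PySem.Dict.ofList event
      match pvMetaFieldMapping.get? (pvSafeText (d.get? "code")) with
      | none => pvGoB rest r l i m
      | some k =>
        let cur := if k = "race" then r else if k = "language" then l else if k = "insurance" then i else m
        if cur.isSome then pvGoB rest r l i m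
        else
          let candidate :=
            let a := pvSafeText (d.get? "code_specifics")
            if a ≠ "" then a else pvSafeText (d.get? "text_value")
          if candidate ≠ "" then
            pvGoB rest (if k = "race" then some candidate else r)
                       (if k = "language" then some candidate else l)
                       (if k = "insurance" then some candidate else i)
                       (if k = "marital_status" then some candidate else m)
          else pvGoB rest r l i m

def extract_meta_fields_py_alt (pre_or_admission_events : List (List (String × String))) : List (String × Option String) :=
  let res := pvGoB pre_or_admission_events.reverse none none none none
  [("race", res.1), ("language", res.2.1), ("insurance", res.2.2.1), ("marital_status", res.2.2.2)]

-- ===== PRECONDITION & SPEC =====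
def Spec_extract_meta_fields_py (pre_or_admission_events : List (List (String × String))) (out : List (String × Option String)) : Prop := out = extract_meta_fields_py_alt pre_or_admission_events
instance (pre_or_admission_events : List (List (String × String))) (out : List (String × Option String)) : Decidable (Spec_extract_meta_fields_py pre_or_admission_events out) := by unfold Spec_extract_meta_fields_py; infer_instance

-- ===== CLAIM (what is proved, stated in full; the proofs are below) =====
def Claim_equal_extract_meta_fields_py : Prop := ∀ (pre_or_admission_events : List (List (String × String))), Dom_extract_meta_fields_py pre_or_admission_events → Spec_extract_meta_fields_py pre_or_admission_events (extract_meta_fields_py pre_or_admission_events)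

-- ===== LEMMAS AND PROOFS =====

-- the per-event update both programs perform: `some (field, candidate)` when the event
-- names a meta field and has a truthy candidate, `none` otherwise
def pvUpd (event : List (String × String)) : Option (String × String) :=
  let d := PySem.Dict.ofList event
  match pvMetaFieldMapping.get? (pvSafeText (d.get? "code")) with
  | none => none
  | some k =>
    let candidate :=
      let a := pvSafeText (d.get? "code_specifics")
      if a ≠ "" then a else pvSafeText (d.get? "text_value")
    if candidate ≠ "" then some (k, candidate) else none

def pvSel (f : String) (event : List (String × String)) : Option String :=
  match pvUpd event with
  | some (k, c) => if k = f then some c else none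
  | none => none

-- first truthy candidate for field f in scan order
def pvFS (f : String) (es : List (List (String × String))) : Option String :=
  es.findSome? (pvSel f)

lemma pvMeta_get?_cases (s k : String) (h : pvMetaFieldMapping.get? s = some k) :
    k = "race" ∨ k = "language" ∨ k = "insurance" ∨ k = "marital_status" := by
  have e : pvMetaFieldMapping = PySem.Dict.mk [("META_RACE", "race"), ("META_LANGUAGE", "language"),
      ("META_INSURANCE", "insurance"), ("META_MARTIAL_STATUS", "marital_status")] := by rfl
  rw [e] at h
  simp only [PySem.Dict.get?] at h
  cases hf : List.find? (fun p => p.1 == s) [("META_RACE", "race"), ("META_LANGUAGE", "language"),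
      ("META_INSURANCE", "insurance"), ("META_MARTIAL_STATUS", "marital_status")] with
  | none => simp [hf] at h
  | some p =>
    have hm := List.mem_of_find?_eq_some hf
    simp only [hf, Option.map_some] at h
    fin_cases hm <;> simp_all

lemma pvUpd_some_field (e : List (String × String)) (k c : String) (h : pvUpd e = some (k, c)) :
    k = "race" ∨ k = "language" ∨ k = "insurance" ∨ k = "marital_status" := by
  unfold pvUpd at h
  cases hg : pvMetaFieldMapping.get? (pvSafeText ((PySem.Dict.ofList e).get? "code")) with
  | none => simp [hg] at h
  | some k' =>
    have := pvMeta_get?_cases _ _ hg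
    simp only [hg] at h
    split at h <;> simp_all

-- one step of B's loop, phrased through the per-event update
lemma pvGoB_cons' (e : List (String × String)) (rest : List (List (String × String)))
    (r l i m : Option String) (hb : (r.isSome && l.isSome && i.isSome && m.isSome) = false) :
    pvGoB (e :: rest) r l i m =
      match pvUpd e with
      | none => pvGoB rest r l i m
      | some (k, c) =>
        if (if k = "race" then r else if k = "language" then l else if k = "insurance" then i else m).isSome
        then pvGoB rest r l i m
        else pvGoB rest (if k = "race" then some c else r) (if k = "language" then some c else l)
                        (if k = "insurance" then some c else i) (if k = "marital_status" then some c else m) := by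
  rw [pvGoB]
  simp only [hb, Bool.false_eq_true, if_false, pvUpd]
  cases hg : pvMetaFieldMapping.get? (pvSafeText ((PySem.Dict.ofList e).get? "code")) with
  | none => simp
  | some k =>
    by_cases h1 : pvSafeText ((PySem.Dict.ofList e).get? "code_specifics") = "" <;>
    by_cases h2 : pvSafeText ((PySem.Dict.ofList e).get? "text_value") = "" <;>
      simp [h1, h2]

-- B's loop returns, for each field, its accumulator if set, else the first match in scan order
lemma pvGoB_eq (es : List (List (String × String))) :
    ∀ r l i m, pvGoB es r l i m =
      (r.or (pvFS "race" es), l.or (pvFS "language" es), i.or (pvFS "insurance" es), m.or (pvFS "marital_status" es)) := by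
  induction es with
  | nil => intro r l i m; simp [pvGoB, pvFS]
  | cons e rest ih =>
    intro r l i m
    by_cases hb : (r.isSome && l.isSome && i.isSome && m.isSome) = true
    · obtain ⟨⟨⟨hr, hl⟩, hi⟩, hm⟩ := by simpa [Bool.and_eq_true] using hb
      obtain ⟨ra, hra⟩ := Option.isSome_iff_exists.mp hr
      obtain ⟨la, hla⟩ := Option.isSome_iff_exists.mp hl
      obtain ⟨ia, hia⟩ := Option.isSome_iff_exists.mp hi
      obtain ⟨ma, hma⟩ := Option.isSome_iff_exists.mp hm
      subst hra hla hia hma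
      rw [pvGoB]
      simp
    · have hb' : (r.isSome && l.isSome && i.isSome && m.isSome) = false := by
        simpa using hb
      rw [pvGoB_cons' e rest r l i m hb']
      cases hu : pvUpd e with
      | none =>
        have hsel : ∀ f, pvSel f e = none := by intro f; simp [pvSel, hu]
        simp [ih, pvFS, hsel]
      | some kc =>
        obtain ⟨k, c⟩ := kc
        have hsel : ∀ f, pvSel f e = if k = f then some c else none := by
          intro f; simp [pvSel, hu]
        rcases pvUpd_some_field e k c hu with hk | hk | hk | hk <;> subst hk <;>
          simp only [] <;>
          rcases hr : r with _ | ra <;> rcases hl : l with _ | la <;>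
          rcases hi' : i with _ | ia <;> rcases hm : m with _ | ma <;>
          simp_all [pvFS]

-- A's fold yields, for each field, the last truthy candidate (= first in reverse order)
lemma pvFoldA_eq (es : List (List (String × String))) :
    es.foldl (fun vals event =>
      let d := PySem.Dict.ofList event
      let code := pvSafeText (d.get? "code")
      match pvMetaFieldMapping.get? code with
      | none => vals
      | some mapped_key =>
        let candidate :=
          let a := pvSafeText (d.get? "code_specifics")
          if a ≠ "" then a else pvSafeText (d.get? "text_value")
        if candidate ≠ "" then vals.insert mapped_key (some candidate) else vals)
      (PySem.Dict.ofList [("race", none), ("language", none), ("insurance", none), ("marital_status", none)]) =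
    PySem.Dict.mk [("race", pvFS "race" es.reverse), ("language", pvFS "language" es.reverse),
      ("insurance", pvFS "insurance" es.reverse), ("marital_status", pvFS "marital_status" es.reverse)] := by
  induction es using List.reverseRecOn with
  | nil => rfl
  | append_singleton es e ih =>
    rw [List.foldl_append, ih]
    have hrev : (es ++ [e]).reverse = e :: es.reverse := by simp
    rw [hrev]
    cases hg : pvMetaFieldMapping.get? (pvSafeText ((PySem.Dict.ofList e).get? "code")) with
    | none =>
      have hsel : ∀ f, pvSel f e = none := by intro f; simp [pvSel, pvUpd, hg]
      simp [List.foldl, hg, pvFS, hsel]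
    | some k =>
      rcases pvMeta_get?_cases _ _ hg with hk | hk | hk | hk <;> subst hk <;>
      by_cases h1 : pvSafeText ((PySem.Dict.ofList e).get? "code_specifics") = "" <;>
      by_cases h2 : pvSafeText ((PySem.Dict.ofList e).get? "text_value") = "" <;>
        simp_all [List.foldl, pvFS, pvSel, pvUpd, PySem.Dict.items_insert, PySem.Dict.ext_iff,
          PySem.Dict.contains_mk]

-- ===== VERDICT (by name: the statement is the Claim_ definition above) =====
theorem extract_meta_fields_py_spec : Claim_equal_extract_meta_fields_py := by
  intro es _
  simp only [Spec_extract_meta_fields_py, extract_meta_fields_py, extract_meta_fields_py_alt]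
  rw [pvFoldA_eq, pvGoB_eq]
  rfl
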